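-- pv_equiv track=rewrite | github.com/fsulib/metadataWorkflowResources | csv4cat/MODStools.py | nameGen
-- ===== SOURCE A (Python) =====
-- def nameGen(names, fullName):
--     keys = []
--     for key in names.keys():
--         keys.append(key)
--     if all(x in keys for x in ['family', 'given', 'termsOfAddress', 'date']):
--         fullName = fullName + names['family'] + ', ' + names['given'] + ', ' + names['termsOfAddress'] + ' ' + names['date']
--     elif all(x in keys for x in ['family', 'given', 'date']):
--         fullName = fullName + names['family'] + ', ' + names['given'] + ' ' + names['date']
--     elif all(x in keys for x in ['family', 'given', 'termsOfAddress']):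
--         fullName = fullName + names['family'] + ', ' + names['given'] + ', ' + names['termsOfAddress']
--     elif all(x in keys for x in ['family', 'termsOfAddress', 'date']):
--         fullName = fullName + names['family'] + ', ' + names['termsOfAddress'] + ' ' + names['date']
--     elif all(x in keys for x in ['given', 'termsOfAddress', 'date']):
--         fullName = fullName + names['given'] + ', ' + names['termsOfAddress'] + ' ' + names['date']
--     elif all(x in keys for x in ['family', 'given']):
--         fullName = fullName + names['family'] + ', ' + names['given']
--     elif all(x in keys for x in ['family', 'date']):
--         fullName = fullName + names['family'] + ', ' + names['date']
--     elif all(x in keys for x in ['family', 'termsOfAddress']):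
--         fullName = fullName + names['family'] + ', ' + names['termsOfAddress']
--     elif all(x in keys for x in ['given', 'date']):
--         fullName = fullName + names['given'] + ', ' + names['date']
--     elif all(x in keys for x in ['given', 'termsOfAddress']):
--         fullName = fullName + names['given'] + ', ' + names['termsOfAddress']
--     elif all(x in keys for x in ['termsOfAddress', 'date']):
--         fullName = fullName + ', ' + names['termsOfAddress'] + ' ' + names['date']
--     elif 'date' in keys:
--         fullName = fullName + ', ' + names['date']
--     elif 'termsOfAddress' in keys:
--         fullName = fullName + ', ' + names['termsOfAddress']
--     return fullName
-- ===== SOURCE B (Python) =====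
-- def nameGen(names, fullName):
--     f = names.get('family', '')
--     g = names.get('given', '')
--     t = names.get('termsOfAddress', '')
--     d = names.get('date', '')
--     present = ''.join(c for c, k in zip('FGTD', ('family', 'given', 'termsOfAddress', 'date')) if k in names)
--     table = {
--         'FGTD': f + ', ' + g + ', ' + t + ' ' + d,
--         'FGD': f + ', ' + g + ' ' + d,
--         'FGT': f + ', ' + g + ', ' + t,
--         'FTD': f + ', ' + t + ' ' + d,
--         'GTD': g + ', ' + t + ' ' + d,
--         'FG': f + ', ' + g,
--         'FD': f + ', ' + d,
--         'FT': f + ', ' + t,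
--         'GD': g + ', ' + d,
--         'GT': g + ', ' + t,
--         'TD': ', ' + t + ' ' + d,
--         'D': ', ' + d,
--         'T': ', ' + t,
--     }
--     return fullName + table.get(present, '')
-- ===== Notes on version B (the rewrite author's own statement) =====
-- stated objective: simpler
-- what changed: Replaces the 13-branch sequential superset-test cascade with a single table lookup: compute the string key of recognized name-part keys present and look the formatted suffix up in a dict keyed by that exact subset.
import Mathlib
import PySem

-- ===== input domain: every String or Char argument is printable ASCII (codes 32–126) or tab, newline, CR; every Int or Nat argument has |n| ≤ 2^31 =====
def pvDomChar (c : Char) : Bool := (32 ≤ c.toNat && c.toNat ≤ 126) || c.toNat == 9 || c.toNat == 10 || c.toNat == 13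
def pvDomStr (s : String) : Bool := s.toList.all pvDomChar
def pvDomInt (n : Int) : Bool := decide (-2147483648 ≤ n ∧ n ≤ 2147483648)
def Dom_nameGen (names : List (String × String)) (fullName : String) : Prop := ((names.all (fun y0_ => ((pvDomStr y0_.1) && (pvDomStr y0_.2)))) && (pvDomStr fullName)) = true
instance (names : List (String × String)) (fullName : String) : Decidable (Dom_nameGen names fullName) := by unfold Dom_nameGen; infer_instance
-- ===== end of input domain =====

-- B replaces A's 13-branch superset-test cascade by one table lookup keyed by the exact
-- subset of recognized name parts present; objective: simpler.

-- ===== PORT A =====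
def nameGen (names : List (String × String)) (fullName : String) : String :=
  let nd : PySem.Dict String String := PySem.Dict.mk names
  let keys : List String := (PySem.Dict.keys nd).foldl (fun acc k => acc ++ [k]) []
  if ["family", "given", "termsOfAddress", "date"].all (fun x => keys.contains x) then
    fullName ++ nd.getD "family" "" ++ ", " ++ nd.getD "given" "" ++ ", " ++ nd.getD "termsOfAddress" "" ++ " " ++ nd.getD "date" ""
  else if ["family", "given", "date"].all (fun x => keys.contains x) then
    fullName ++ nd.getD "family" "" ++ ", " ++ nd.getD "given" "" ++ " " ++ nd.getD "date" ""
  else if ["family", "given", "termsOfAddress"].all (fun x => keys.contains x) then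
    fullName ++ nd.getD "family" "" ++ ", " ++ nd.getD "given" "" ++ ", " ++ nd.getD "termsOfAddress" ""
  else if ["family", "termsOfAddress", "date"].all (fun x => keys.contains x) then
    fullName ++ nd.getD "family" "" ++ ", " ++ nd.getD "termsOfAddress" "" ++ " " ++ nd.getD "date" ""
  else if ["given", "termsOfAddress", "date"].all (fun x => keys.contains x) then
    fullName ++ nd.getD "given" "" ++ ", " ++ nd.getD "termsOfAddress" "" ++ " " ++ nd.getD "date" ""
  else if ["family", "given"].all (fun x => keys.contains x) then
    fullName ++ nd.getD "family" "" ++ ", " ++ nd.getD "given" ""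
  else if ["family", "date"].all (fun x => keys.contains x) then
    fullName ++ nd.getD "family" "" ++ ", " ++ nd.getD "date" ""
  else if ["family", "termsOfAddress"].all (fun x => keys.contains x) then
    fullName ++ nd.getD "family" "" ++ ", " ++ nd.getD "termsOfAddress" ""
  else if ["given", "date"].all (fun x => keys.contains x) then
    fullName ++ nd.getD "given" "" ++ ", " ++ nd.getD "date" ""
  else if ["given", "termsOfAddress"].all (fun x => keys.contains x) then
    fullName ++ nd.getD "given" "" ++ ", " ++ nd.getD "termsOfAddress" ""
  else if ["termsOfAddress", "date"].all (fun x => keys.contains x) then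
    fullName ++ ", " ++ nd.getD "termsOfAddress" "" ++ " " ++ nd.getD "date" ""
  else if keys.contains "date" then
    fullName ++ ", " ++ nd.getD "date" ""
  else if keys.contains "termsOfAddress" then
    fullName ++ ", " ++ nd.getD "termsOfAddress" ""
  else
    fullName

-- ===== PORT B =====
def nameGen_alt (names : List (String × String)) (fullName : String) : String :=
  let nd : PySem.Dict String String := PySem.Dict.mk names
  let f := nd.getD "family" ""
  let g := nd.getD "given" ""
  let t := nd.getD "termsOfAddress" ""
  let d := nd.getD "date" ""
  let present := String.join
    ((([("F", "family"), ("G", "given"), ("T", "termsOfAddress"), ("D", "date")]).filter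
        (fun p => nd.contains p.2)).map (fun p => p.1))
  let table : PySem.Dict String String := PySem.Dict.mk
    [("FGTD", f ++ ", " ++ g ++ ", " ++ t ++ " " ++ d),
     ("FGD", f ++ ", " ++ g ++ " " ++ d),
     ("FGT", f ++ ", " ++ g ++ ", " ++ t),
     ("FTD", f ++ ", " ++ t ++ " " ++ d),
     ("GTD", g ++ ", " ++ t ++ " " ++ d),
     ("FG", f ++ ", " ++ g),
     ("FD", f ++ ", " ++ d),
     ("FT", f ++ ", " ++ t),
     ("GD", g ++ ", " ++ d),
     ("GT", g ++ ", " ++ t),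
     ("TD", ", " ++ t ++ " " ++ d),
     ("D", ", " ++ d),
     ("T", ", " ++ t)]
  fullName ++ table.getD present ""

-- ===== PRECONDITION & SPEC =====
def Spec_nameGen (names : List (String × String)) (fullName : String) (out : String) : Prop := out = nameGen_alt names fullName
instance (names : List (String × String)) (fullName : String) (out : String) : Decidable (Spec_nameGen names fullName out) := by unfold Spec_nameGen; infer_instance

-- ===== CLAIM (what is proved, stated in full; the proofs are below) =====
def Claim_equal_nameGen : Prop := ∀ (names : List (String × String)) (fullName : String), Dom_nameGen names fullName → Spec_nameGen names fullName (nameGen names fullName)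

-- ===== LEMMAS AND PROOFS =====

theorem foldl_append_singleton (l : List String) :
    l.foldl (fun acc k => acc ++ [k]) [] = l := by
  have h : ∀ (l acc : List String), l.foldl (fun acc k => acc ++ [k]) acc = acc ++ l := by
    intro l
    induction l with
    | nil => simp
    | cons x xs ih => intro acc; simp [List.foldl, ih]
  simpa using h l []

-- ===== VERDICT (by name: the statement is the Claim_ definition above) =====
theorem any_fst_eq_decide_mem (names : List (String × String)) (k : String) :
    (names.any (fun p => p.1 == k)) = decide (k ∈ names.map (fun x => x.1)) := by
  induction names with
  | nil => rfl
  | cons x xs ih =>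
    simp only [List.any_cons, ih, List.map_cons, List.mem_cons]
    by_cases h : x.1 = k
    · simp [h]
    · simp [h, Ne.symm h]

theorem nameGen_spec : Claim_equal_nameGen := by
  intro names fullName _
  show nameGen names fullName = nameGen_alt names fullName
  unfold nameGen nameGen_alt
  simp only [foldl_append_singleton]
  by_cases hF : "family" ∈ names.map (fun x => x.1) <;>
  by_cases hG : "given" ∈ names.map (fun x => x.1) <;>
  by_cases hT : "termsOfAddress" ∈ names.map (fun x => x.1) <;>
  by_cases hD : "date" ∈ names.map (fun x => x.1) <;>
    simp [hF, hG, hT, hD, any_fst_eq_decide_mem, String.join, String.append_assoc,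
      PySem.Dict.getD_eq_get?_getD, PySem.Dict.get?]
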